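-- pv_equiv track=rewrite | github.com/racksa/TimFilSimMod | pyfile/driver/util.py | even_list_index
-- ===== SOURCE A (Python) =====
-- def even_list_index(n, m):
--     sublist_length = n // m  # Floor division to get the length of each sublist
--     remainder = n % m  # Get the remainder to distribute extra elements
--
--     result = [0]
--     start = 0
--
--     for i in range(m):
--         end = start + sublist_length + (1 if i < remainder else 0)
--         result.append(end)
--         start = end
--
--     return result
-- ===== SOURCE B (Python) =====
-- def even_list_index(n, m):
--     sublist_length = n // m  # keeps ZeroDivisionError for m == 0
--     remainder = n % m
--     return [0] + [i * sublist_length + min(i, remainder) for i in range(1, m + 1)]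
-- ===== Notes on version B (the rewrite author's own statement) =====
-- stated objective: simpler
-- what changed: Replaces the running-start accumulator loop with a direct closed-form comprehension: boundary i is i*(n//m) + min(i, n%m), computed independently for each i.
import Mathlib
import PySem

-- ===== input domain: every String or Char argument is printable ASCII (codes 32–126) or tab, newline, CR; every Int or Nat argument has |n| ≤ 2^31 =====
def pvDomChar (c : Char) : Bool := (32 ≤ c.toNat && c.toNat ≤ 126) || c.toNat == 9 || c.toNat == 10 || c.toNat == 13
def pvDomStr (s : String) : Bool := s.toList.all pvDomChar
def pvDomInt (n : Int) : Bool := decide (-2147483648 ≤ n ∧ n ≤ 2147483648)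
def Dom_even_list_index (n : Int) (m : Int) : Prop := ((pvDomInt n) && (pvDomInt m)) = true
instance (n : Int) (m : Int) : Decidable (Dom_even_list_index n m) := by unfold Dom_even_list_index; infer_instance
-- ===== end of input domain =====

-- B replaces A's running-start accumulator loop by a closed-form comprehension (simpler).

-- ===== PORT A =====
def even_list_index (n : Int) (m : Int) : List Int :=
  let sublist_length := PySem.Int.floordiv n m
  let remainder := PySem.Int.mod n m
  let st := (PySem.List.pyRange 0 m 1).foldl
    (fun (p : List Int × Int) i =>
      let e := p.2 + sublist_length + (if i < remainder then 1 else 0)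
      (p.1 ++ [e], e))
    ([0], 0)
  st.1

-- ===== PORT B =====
def even_list_index_alt (n : Int) (m : Int) : List Int :=
  let sublist_length := PySem.Int.floordiv n m
  let remainder := PySem.Int.mod n m
  [0] ++ (PySem.List.pyRange 1 (m + 1) 1).map (fun i => i * sublist_length + min i remainder)

-- ===== PRECONDITION & SPEC =====
-- Pre_ excludes exactly m = 0, where Python A raises ZeroDivisionError (B raises too).
def Pre_even_list_index (n : Int) (m : Int) : Prop := m ≠ 0
instance (n : Int) (m : Int) : Decidable (Pre_even_list_index n m) := by unfold Pre_even_list_index; infer_instance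
def pvWitness_even_list_index : Int × Int := (10, 3)

def Spec_even_list_index (n : Int) (m : Int) (out : List Int) : Prop := out = even_list_index_alt n m
instance (n : Int) (m : Int) (out : List Int) : Decidable (Spec_even_list_index n m out) := by unfold Spec_even_list_index; infer_instance

-- ===== CLAIM (what is proved, stated in full; the proofs are below) =====
def Claim_equal_even_list_index : Prop := ∀ (n : Int) (m : Int), Dom_even_list_index n m → Pre_even_list_index n m → Spec_even_list_index n m (even_list_index n m)

-- ===== LEMMAS AND PROOFS =====

-- Loop invariant: starting from position a with accumulated start a*q + min a r,
-- folding A's step over range(a, a+k) appends the closed-form boundaries a+1 .. a+k.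
theorem evenLoop_invariant (q r : Int) :
    ∀ (k : Nat) (a : Int), 0 ≤ a → ∀ (acc : List Int),
      (PySem.List.pyRange a (a + k) 1).foldl
        (fun (p : List Int × Int) i =>
          let e := p.2 + q + (if i < r then 1 else 0)
          (p.1 ++ [e], e))
        (acc, a * q + min a r)
      = (acc ++ (PySem.List.pyRange (a + 1) (a + k + 1) 1).map (fun i => i * q + min i r),
         (a + k) * q + min (a + k) r) := by
  intro k
  induction k with
  | zero =>
    intro a ha acc
    simp
  | succ k ih =>
    intro a ha acc
    rw [PySem.List.pyRange_one_cons (by push_cast; omega : a < a + (k + 1 : Nat))]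
    have hstep : a * q + min a r + q + (if a < r then 1 else 0)
        = (a + 1) * q + min (a + 1) r := by
      have hmin : min a r + (if a < r then 1 else 0) = min (a + 1) r := by
        by_cases h : a < r
        · simp only [if_pos h]; omega
        · simp only [if_neg h]; omega
      have hmul : (a + 1) * q = a * q + q := by ring
      linarith [hmin, hmul]
    have := ih (a + 1) (by omega) (acc ++ [(a + 1) * q + min (a + 1) r])
    simp only [List.foldl_cons, hstep]
    have harg : a + 1 + (k : Int) = a + (k + 1 : Nat) := by push_cast; ring
    rw [harg] at this
    rw [this]
    rw [PySem.List.pyRange_one_cons (by push_cast; omega : a + 1 < a + (k + 1 : Nat) + 1)]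
    simp

-- ===== VERDICT (by name: the statement is the Claim_ definition above) =====
theorem even_list_index_spec : Claim_equal_even_list_index := by
  intro n m _ hm
  unfold Spec_even_list_index even_list_index even_list_index_alt
  dsimp only
  set q := PySem.Int.floordiv n m with hq
  set r := PySem.Int.mod n m with hrdef
  rcases lt_or_gt_of_ne hm with hneg | hpos
  · simp [PySem.List.pyRange_one_eq_nil (by omega : m ≤ (0:Int)),
      PySem.List.pyRange_one_eq_nil (by omega : m + 1 ≤ (1:Int))]
  · have hr : 0 ≤ r := by
      rw [hrdef]
      exact PySem.Int.mod_nonneg n hpos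
    have h0 : (0:Int) * q + min 0 r = 0 := by simp [min_eq_left hr]
    have := evenLoop_invariant q r m.toNat 0 le_rfl [0]
    rw [h0] at this
    have hm' : (0:Int) + (m.toNat : Int) = m := by omega
    rw [hm'] at this
    rw [this]
    simp
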